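-- pv_equiv track=rewrite | github.com/happykhan/alleleatlas | alleleatlas/cluster/collapse_profiles.py | _count_clusters_at_threshold
-- ===== SOURCE A (Python) =====
-- def _count_clusters_at_threshold(mst_edges, n_samples, threshold):
--     """Count number of clusters when collapsing edges < threshold."""
--     parent = list(range(n_samples))
--
--     def find(x):
--         while parent[x] != x:
--             parent[x] = parent[parent[x]]
--             x = parent[x]
--         return x
--
--     def union(a, b):
--         ra, rb = find(a), find(b)
--         if ra != rb:
--             parent[rb] = ra
--
--     # Collapse edges below threshold
--     for u, v, w in mst_edges:
--         if w < threshold: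
--             union(u, v)
--
--     # Count unique roots
--     return len(set(find(i) for i in range(n_samples)))
-- ===== SOURCE B (Python) =====
-- def _count_clusters_at_threshold(mst_edges, n_samples, threshold):
--     """Count number of clusters when collapsing edges < threshold."""
--     labels = list(range(n_samples))
--     for u, v, w in mst_edges:
--         if w < threshold:
--             lu, lv = labels[u], labels[v]
--             if lu != lv:
--                 labels = [lu if l == lv else l for l in labels]
--     # each cluster is labelled by one of its own members, so count self-labelled samples
--     return sum(1 for i, l in enumerate(labels) if l == i)
-- ===== Notes on version B (the rewrite author's own statement) =====
-- stated objective: simpler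
-- what changed: Replaces union-find with path halving by flat label merging: one label per sample, each below-threshold edge rewrites every occurrence of one endpoint's label to the other's, and clusters are counted as the self-labelled samples instead of a set of find() roots.
import Mathlib
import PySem

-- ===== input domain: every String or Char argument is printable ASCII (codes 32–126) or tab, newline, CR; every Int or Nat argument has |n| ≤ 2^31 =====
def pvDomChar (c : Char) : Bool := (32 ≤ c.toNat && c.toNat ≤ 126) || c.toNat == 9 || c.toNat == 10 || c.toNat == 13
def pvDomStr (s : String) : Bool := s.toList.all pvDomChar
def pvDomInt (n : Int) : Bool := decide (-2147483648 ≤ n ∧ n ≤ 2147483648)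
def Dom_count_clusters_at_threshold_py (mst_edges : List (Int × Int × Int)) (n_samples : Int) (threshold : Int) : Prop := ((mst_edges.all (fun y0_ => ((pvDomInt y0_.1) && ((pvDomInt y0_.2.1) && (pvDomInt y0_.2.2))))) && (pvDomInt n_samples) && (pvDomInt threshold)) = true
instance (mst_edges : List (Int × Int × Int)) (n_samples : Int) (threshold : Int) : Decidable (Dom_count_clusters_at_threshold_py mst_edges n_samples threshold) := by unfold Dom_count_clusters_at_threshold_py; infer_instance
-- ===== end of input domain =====

-- B replaces A's union-find (path halving) by direct label merging (simpler, not faster);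
-- equal return value is proved on Pre_ (the inputs where the Python A returns instead of raising IndexError).

-- ===== PORT A =====
-- Python's `parent` list / `set()` are held as `Array Int` / `Std.HashSet Int` so the port
-- evaluates fast; element reads/writes below are Python-exact on in-range (incl. negative)
-- indices, and Pre_ excludes the IndexError inputs.  Only the set's size is observed.

-- `xs[i]` read (negative index counts from the end; IndexError inputs excluded by Pre_)
def pvAG (p : Array Int) (x : Int) : Int :=
  if 0 ≤ x then p.getD x.toNat 0
  else if -(p.size:Int) ≤ x then p.getD (x + p.size).toNat 0 else 0

-- `xs[i] = v` write (same indexing rule; IndexError inputs excluded by Pre_)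
def pvASet (p : Array Int) (x v : Int) : Array Int :=
  if 0 ≤ x then p.setIfInBounds x.toNat v
  else if -(p.size:Int) ≤ x then p.setIfInBounds (x + p.size).toNat v else p

-- `find(x)`: while parent[x] != x: parent[x] = parent[parent[x]]; x = parent[x].
-- Fuel-indexed transcription of the while loop (the state is (parent, x)); under Pre_ the
-- Python loop terminates within `parent.size` iterations, so fuel `parent.size + 1` is exact.
def pvFindA : Nat → Array Int → Int → Array Int × Int
  | 0, p, x => (p, x)
  | fuel+1, p, x =>
    if pvAG p x ≠ x then
      let p' := pvASet p x (pvAG p (pvAG p x))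
      pvFindA fuel p' (pvAG p' x)
    else (p, x)

-- `union(a, b)`: ra, rb = find(a), find(b); if ra != rb: parent[rb] = ra
def pvUnionA (p : Array Int) (a b : Int) : Array Int :=
  let fa := pvFindA (p.size + 1) p a
  let fb := pvFindA (fa.1.size + 1) fa.1 b
  if fa.2 ≠ fb.2 then pvASet fb.1 fb.2 fa.2 else fb.1

def count_clusters_at_threshold_py (mst_edges : List (Int × Int × Int)) (n_samples : Int) (threshold : Int) : Int :=
  -- parent = list(range(n_samples))
  let parent0 := (PySem.List.pyRange 0 n_samples 1).toArray
  -- for u, v, w in mst_edges: if w < threshold: union(u, v)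
  let parent := mst_edges.foldl
    (fun p e => if e.2.2 < threshold then pvUnionA p e.1 e.2.1 else p) parent0
  -- return len(set(find(i) for i in range(n_samples)))  (find mutates parent as it runs)
  let fin := (PySem.List.pyRange 0 n_samples 1).foldl
    (fun (st : Array Int × Std.HashSet Int) i =>
      let f := pvFindA (st.1.size + 1) st.1 i
      (f.1, st.2.insert f.2)) (parent, (∅ : Std.HashSet Int))
  (fin.2.size : Int)

-- ===== PORT B =====
-- shared indexing helper for B's list reads (IndexError inputs are excluded by Pre_)
def pvG (p : List Int) (x : Int) : Int := PySem.List.pyGetD p x 0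

def count_clusters_at_threshold_py_alt (mst_edges : List (Int × Int × Int)) (n_samples : Int) (threshold : Int) : Int :=
  -- labels = list(range(n_samples))
  -- for u, v, w in mst_edges:
  --   if w < threshold:
  --     lu, lv = labels[u], labels[v]
  --     if lu != lv: labels = [lu if l == lv else l for l in labels]
  let labels := mst_edges.foldl
    (fun L e =>
      if e.2.2 < threshold then
        let lu := pvG L e.1
        let lv := pvG L e.2.1
        if lu ≠ lv then L.map (fun l => if l = lv then lu else l) else L
      else L) (PySem.List.pyRange 0 n_samples 1)
  -- return sum(1 for i, l in enumerate(labels) if l == i)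
  -- (enumerate + sum ported as one fold carrying the state (i, count); exact)
  (labels.foldl (fun (st : Int × Int) l => (st.1 + 1, if l = st.1 then st.2 + 1 else st.2)) (0, 0)).2

-- ===== PRECONDITION & SPEC =====
-- Pre_ excludes exactly the inputs where the Python A raises IndexError: some edge below the
-- threshold carries an endpoint outside [-n_samples, n_samples) (B raises there too).
def Pre_count_clusters_at_threshold_py (mst_edges : List (Int × Int × Int)) (n_samples : Int) (threshold : Int) : Prop :=
  ∀ e ∈ mst_edges, e.2.2 < threshold →
    -n_samples ≤ e.1 ∧ e.1 < n_samples ∧ -n_samples ≤ e.2.1 ∧ e.2.1 < n_samples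
instance (mst_edges : List (Int × Int × Int)) (n_samples : Int) (threshold : Int) : Decidable (Pre_count_clusters_at_threshold_py mst_edges n_samples threshold) := by unfold Pre_count_clusters_at_threshold_py; infer_instance

def pvWitness_count_clusters_at_threshold_py : (List (Int × Int × Int)) × Int × Int := ([(0, 1, 0)], 2, 1)

def Spec_count_clusters_at_threshold_py (mst_edges : List (Int × Int × Int)) (n_samples : Int) (threshold : Int) (out : Int) : Prop := out = count_clusters_at_threshold_py_alt mst_edges n_samples threshold
instance (mst_edges : List (Int × Int × Int)) (n_samples : Int) (threshold : Int) (out : Int) : Decidable (Spec_count_clusters_at_threshold_py mst_edges n_samples threshold out) := by unfold Spec_count_clusters_at_threshold_py; infer_instance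

-- ===== CLAIM (what is proved, stated in full; the proofs are below) =====
def Claim_equal_count_clusters_at_threshold_py : Prop := ∀ (mst_edges : List (Int × Int × Int)) (n_samples : Int) (threshold : Int), Dom_count_clusters_at_threshold_py mst_edges n_samples threshold → Pre_count_clusters_at_threshold_py mst_edges n_samples threshold → Spec_count_clusters_at_threshold_py mst_edges n_samples threshold (count_clusters_at_threshold_py mst_edges n_samples threshold)

-- ===== LEMMAS AND PROOFS =====

-- basic facts about Python indexing used throughout
theorem pvG_neg (p : List Int) (x : Int) (h1 : -(p.length:Int) ≤ x) (h2 : x < 0) :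
    pvG p x = pvG p (x + p.length) := by
  have hx : ¬ (0 ≤ x) := by omega
  have h3 : (0:Int) ≤ x + p.length := by omega
  have h4 : x + (p.length:Int) < p.length := by omega
  have he : (x + (p.length:Int)).toNat = p.length - (-x).toNat := by omega
  simp only [pvG, PySem.List.pyGetD, PySem.List.pyGet?, PySem.List.pyIdx?, if_pos h3, if_pos h4,
    if_neg hx, if_pos h1, he]

theorem pvG_map (f : Int → Int) (L : List Int) (z : Int) (hz0 : 0 ≤ z) (hz1 : z < L.length) :
    pvG (L.map f) z = f (pvG L z) := by
  have h1 : z < (L.map f).length := by simpa using hz1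
  rw [pvG, pvG, PySem.List.pyGetD_eq_getElem _ 0 hz0 h1, PySem.List.pyGetD_eq_getElem _ 0 hz0 hz1]
  simp

theorem pvG_mem (L : List Int) (x : Int) (h0 : 0 ≤ x) (h1 : x < L.length) : pvG L x ∈ L := by
  rw [pvG, PySem.List.pyGetD_eq_getElem L 0 h0 h1]
  exact List.getElem_mem _

theorem pvAG_get (p : Array Int) (x : Int) (h0 : 0 ≤ x) (h1 : x < p.size) :
    pvAG p x = p[x.toNat]'(by omega) := by
  unfold pvAG
  rw [if_pos h0]
  simp [Array.getD, (by omega : x.toNat < p.size)]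

theorem pvAG_neg (p : Array Int) (x : Int) (h1 : -(p.size:Int) ≤ x) (h2 : x < 0) :
    pvAG p x = pvAG p (x + p.size) := by
  unfold pvAG
  rw [if_neg (by omega), if_pos h1, if_pos (by omega : (0:Int) ≤ x + p.size)]

theorem pvASet_neg (p : Array Int) (x v : Int) (h1 : -(p.size:Int) ≤ x) (h2 : x < 0) :
    pvASet p x v = pvASet p (x + p.size) v := by
  unfold pvASet
  rw [if_neg (by omega), if_pos h1, if_pos (by omega : (0:Int) ≤ x + p.size)]

theorem pvASet_size (p : Array Int) (x v : Int) : (pvASet p x v).size = p.size := by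
  unfold pvASet
  split_ifs <;> simp

theorem pvASet_self (p : Array Int) (x : Int) (h0 : 0 ≤ x) (h1 : x < p.size) :
    pvASet p x (pvAG p x) = p := by
  unfold pvASet
  rw [if_pos h0, pvAG_get p x h0 h1]
  apply Array.ext
  · simp
  · intro j hj hj2
    rw [Array.getElem_setIfInBounds]
    split
    · next heq => subst heq; rfl
    · rfl

theorem pvAG_set (p : Array Int) (t w z : Int) (ht0 : 0 ≤ t) (ht1 : t < p.size)
    (hz0 : 0 ≤ z) (_hz1 : z < p.size) :
    pvAG (pvASet p t w) z = if z = t then w else pvAG p z := by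
  unfold pvASet pvAG
  rw [if_pos ht0, if_pos hz0, if_pos hz0]
  rw [Array.getD_eq_getD_getElem?, Array.getD_eq_getD_getElem?, Array.getElem?_setIfInBounds]
  by_cases h : z = t
  · rw [if_pos h, if_pos (by omega : t.toNat = z.toNat), if_pos (by omega : t.toNat < p.size)]
    rfl
  · rw [if_neg h, if_neg (by omega : ¬ t.toNat = z.toNat)]

-- the abstract state of A: iterated parent pointers, roots, the forest invariant
def pvIter (p : Array Int) : Nat → Int → Int
  | 0, x => x
  | d+1, x => pvIter p d (pvAG p x)

def pvFix (p : Array Int) (x : Int) : Prop := pvAG p x = x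

def pvRoot (p : Array Int) (x : Int) : Int := pvIter p p.size x

def pvClosed (p : Array Int) : Prop :=
  ∀ x : Int, 0 ≤ x → x < p.size → 0 ≤ pvAG p x ∧ pvAG p x < p.size

def pvGood (p : Array Int) : Prop :=
  pvClosed p ∧ ∀ x : Int, 0 ≤ x → x < (p.size:Int) → pvFix p (pvRoot p x)

def pvNorm (n : Nat) (x : Int) : Int := if x < 0 then x + n else x

def pvKern (p : Array Int) (L : List Int) : Prop :=
  ∀ i j : Int, 0 ≤ i → i < p.size → 0 ≤ j → j < p.size →
    (pvRoot p i = pvRoot p j ↔ pvG L i = pvG L j)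

theorem pvIter_succ_right (p : Array Int) (d : Nat) (x : Int) :
    pvIter p (d+1) x = pvAG p (pvIter p d x) := by
  induction d generalizing x with
  | zero => rfl
  | succ d ih => rw [pvIter, ih (pvAG p x)]; rfl

theorem pvIter_add (p : Array Int) (d e : Nat) (x : Int) :
    pvIter p (d + e) x = pvIter p e (pvIter p d x) := by
  induction d generalizing x with
  | zero => rw [Nat.zero_add]; rfl
  | succ d ih => rw [Nat.succ_add, pvIter, ih, pvIter]

theorem pvIter_fix (p : Array Int) (d : Nat) (x : Int) (h : pvFix p x) : pvIter p d x = x := by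
  induction d with
  | zero => rfl
  | succ d ih => rw [pvIter_succ_right, ih, h]

theorem pvIter_mem (p : Array Int) (d : Nat) (x : Int) (hc : pvClosed p)
    (h0 : 0 ≤ x) (h1 : x < p.size) :
    0 ≤ pvIter p d x ∧ pvIter p d x < p.size := by
  induction d generalizing x with
  | zero => exact ⟨h0, h1⟩
  | succ d ih =>
    obtain ⟨a, b⟩ := hc x h0 h1
    exact ih (pvAG p x) a b

-- helper for pvRoot_unique: a repeat below d0 makes the value at i already fixed
theorem pvFindContrad (p : Array Int) (x : Int) (d0 : Nat)
    (hd0fix : pvFix p (pvIter p d0 x))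
    (i j : Nat) (hlt : i < j)
    (hconst : ∀ m, d0 ≤ m → pvIter p m x = pvIter p d0 x)
    (heq : pvIter p i x = pvIter p j x) : pvFix p (pvIter p i x) := by
  -- periodicity: pvIter p (i + k*(j-i)) x = pvIter p i x
  have hper : ∀ k : Nat, pvIter p (i + k * (j - i)) x = pvIter p i x := by
    intro k
    induction k with
    | zero => simp
    | succ k ih =>
      have h1 : i + (k+1) * (j - i) = (i + k * (j - i)) + (j - i) := by ring
      rw [h1, pvIter_add, ih, ← pvIter_add]
      have h2 : i + (j - i) = j := by omega
      rw [h2, ← heq]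
  have hbig : d0 ≤ i + d0 * (j - i) := by
    have : 1 ≤ j - i := by omega
    calc d0 ≤ d0 * (j - i) := Nat.le_mul_of_pos_right _ (by omega)
    _ ≤ i + d0 * (j - i) := by omega
  rw [← hper d0, hconst _ hbig]
  exact hd0fix

theorem pvRoot_unique (p : Array Int) (x r : Int) (d : Nat) (hc : pvClosed p)
    (h0 : 0 ≤ x) (h1 : x < p.size) (hd : pvIter p d x = r) (hr : pvFix p r) :
    pvRoot p x = r := by
  haveI : DecidablePred fun k => pvFix p (pvIter p k x) := fun k => by
    unfold pvFix; infer_instance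
  have hex : ∃ k, pvFix p (pvIter p k x) := ⟨d, by rw [hd]; exact hr⟩
  set d0 := Nat.find hex with hd0def
  have hd0fix : pvFix p (pvIter p d0 x) := Nat.find_spec hex
  have hconst : ∀ m, d0 ≤ m → pvIter p m x = pvIter p d0 x := by
    intro m hm
    have hsplit : m = d0 + (m - d0) := by omega
    rw [hsplit, pvIter_add, pvIter_fix p (m - d0) _ hd0fix]
  have hle : d0 ≤ p.size := by
    by_contra hgt
    rw [not_le] at hgt
    have hmaps : ∀ k ∈ Finset.range (p.size + 1),
        pvIter p k x ∈ Finset.Ico (0:Int) (p.size:Int) := by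
      intro k _
      obtain ⟨a, b⟩ := pvIter_mem p k x hc h0 h1
      exact Finset.mem_Ico.mpr ⟨a, b⟩
    have hcard : (Finset.Ico (0:Int) (p.size:Int)).card < (Finset.range (p.size + 1)).card := by
      simp
    obtain ⟨i, hi, j, hj, hij, heq⟩ :=
      Finset.exists_ne_map_eq_of_card_lt_of_maps_to hcard hmaps
    simp only [Finset.mem_range] at hi hj
    rcases Nat.lt_or_ge i j with hlt | hge
    · exact absurd (pvFindContrad p x d0 hd0fix i j hlt hconst heq)
        (Nat.find_min hex (m := i) (by omega))
    · have hlt2 : j < i := by omega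
      exact absurd (pvFindContrad p x d0 hd0fix j i hlt2 hconst heq.symm)
        (Nat.find_min hex (m := j) (by omega))
  have hd0d : d0 ≤ d := Nat.find_min' hex (by rw [hd]; exact hr)
  rw [pvRoot, hconst p.size hle, ← hconst d hd0d, hd]

theorem pvRoot_fix (p : Array Int) (x : Int) (hg : pvGood p) (h0 : 0 ≤ x) (h1 : x < p.size) :
    pvFix p (pvRoot p x) := hg.2 x h0 h1

theorem pvRoot_of_fix (p : Array Int) (x : Int) (h : pvFix p x) : pvRoot p x = x :=
  pvIter_fix p p.size x h

theorem pvRoot_g (p : Array Int) (x : Int) (hg : pvGood p) (h0 : 0 ≤ x) (h1 : x < p.size) :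
    pvRoot p (pvAG p x) = pvRoot p x := by
  have h := pvRoot_fix p x hg h0 h1
  calc pvRoot p (pvAG p x) = pvIter p (p.size + 1) x := rfl
  _ = pvAG p (pvIter p p.size x) := pvIter_succ_right p p.size x
  _ = pvRoot p x := h

theorem pvRoot_mem (p : Array Int) (x : Int) (hc : pvClosed p) (h0 : 0 ≤ x) (h1 : x < p.size) :
    0 ≤ pvRoot p x ∧ pvRoot p x < p.size := pvIter_mem p p.size x hc h0 h1

-- chain transfer for the path-halving write parent[x] := parent[parent[x]]
theorem pvHalve_chain (p : Array Int) (x : Int) (hc : pvClosed p)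
    (hx0 : 0 ≤ x) (hx1 : x < p.size) (hne : pvAG p x ≠ x) :
    ∀ d : Nat, ∀ z : Int, 0 ≤ z → z < p.size → pvFix p (pvIter p d z) →
      ∃ e ≤ d, pvIter (pvASet p x (pvAG p (pvAG p x))) e z = pvIter p d z ∧
        pvFix (pvASet p x (pvAG p (pvAG p x))) (pvIter p d z) := by
  have hgx := hc x hx0 hx1
  have hgg := hc _ hgx.1 hgx.2
  have hg' : ∀ w : Int, 0 ≤ w → w < p.size →
      pvAG (pvASet p x (pvAG p (pvAG p x))) w =
        if w = x then pvAG p (pvAG p x) else pvAG p w := by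
    intro w hw0 hw1
    exact pvAG_set p x (pvAG p (pvAG p x)) w hx0 hx1 hw0 hw1
  intro d
  induction d using Nat.strong_induction_on with
  | _ d ih =>
    intro z hz0 hz1 hfix
    by_cases hz : pvAG p z = z
    · have hiter : pvIter p d z = z := pvIter_fix p d z hz
      have hzx : z ≠ x := fun h => hne (by rw [← h]; exact hz)
      rw [hiter]
      refine ⟨0, Nat.zero_le d, rfl, ?_⟩
      show pvAG _ z = z
      rw [hg' z hz0 hz1, if_neg hzx]
      exact hz
    · match d, hfix with
      | 0, hfix => exact absurd hfix hz
      | d'+1, hfix =>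
        by_cases hzx : z = x
        · subst hzx
          by_cases hgfix : pvAG p (pvAG p z) = pvAG p z
          · have hval : pvIter p (d'+1) z = pvAG p z := by
              show pvIter p d' (pvAG p z) = pvAG p z
              exact pvIter_fix p d' _ hgfix
            rw [hval]
            refine ⟨1, by omega, ?_, ?_⟩
            · show pvAG _ z = pvAG p z
              rw [hg' z hz0 hz1, if_pos rfl, hgfix]
            · show pvAG _ (pvAG p z) = pvAG p z
              rw [hg' _ hgx.1 hgx.2, if_neg hne, hgfix]
          · match d', hfix with
            | 0, hfix =>
              have : pvIter p 1 z = pvAG p z := rfl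
              rw [this] at hfix
              exact absurd hfix hgfix
            | d''+1, hfix =>
              have hred : pvIter p (d''+1+1) z = pvIter p d'' (pvAG p (pvAG p z)) := rfl
              rw [hred] at hfix ⊢
              obtain ⟨e, he, hval, hfx⟩ := ih d'' (by omega) (pvAG p (pvAG p z)) hgg.1 hgg.2 hfix
              refine ⟨e+1, by omega, ?_, hfx⟩
              show pvIter _ e (pvAG _ z) = _
              rw [hg' z hz0 hz1, if_pos rfl]
              exact hval
        · have hgz := hc z hz0 hz1
          have hred : pvIter p (d'+1) z = pvIter p d' (pvAG p z) := rfl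
          rw [hred] at hfix ⊢
          obtain ⟨e, he, hval, hfx⟩ := ih d' (by omega) (pvAG p z) hgz.1 hgz.2 hfix
          refine ⟨e+1, by omega, ?_, hfx⟩
          show pvIter _ e (pvAG _ z) = _
          rw [hg' z hz0 hz1, if_neg hzx]
          exact hval

theorem pvHalve_good (p : Array Int) (x : Int) (hg : pvGood p)
    (hx0 : 0 ≤ x) (hx1 : x < p.size) (hne : pvAG p x ≠ x) :
    pvGood (pvASet p x (pvAG p (pvAG p x))) ∧
      (∀ z : Int, 0 ≤ z → z < p.size →
        pvRoot (pvASet p x (pvAG p (pvAG p x))) z = pvRoot p z) := by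
  obtain ⟨hc, hfixall⟩ := hg
  have hgx := hc x hx0 hx1
  have hgg := hc _ hgx.1 hgx.2
  have hlen' : (pvASet p x (pvAG p (pvAG p x))).size = p.size :=
    pvASet_size p x _
  have hc' : pvClosed (pvASet p x (pvAG p (pvAG p x))) := by
    intro w hw0 hw1
    rw [hlen'] at hw1 ⊢
    rw [pvAG_set p x _ w hx0 hx1 hw0 hw1]
    by_cases h : w = x
    · rw [if_pos h]; exact hgg
    · rw [if_neg h]; exact hc w hw0 hw1
  have hroots : ∀ z : Int, 0 ≤ z → z < p.size →
      pvRoot (pvASet p x (pvAG p (pvAG p x))) z = pvRoot p z := by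
    intro z hz0 hz1
    obtain ⟨e, _, hval, hfx⟩ :=
      pvHalve_chain p x hc hx0 hx1 hne p.size z hz0 hz1 (hfixall z hz0 hz1)
    exact pvRoot_unique _ z (pvRoot p z) e hc' hz0 (by rw [hlen']; exact hz1) hval hfx
  refine ⟨⟨hc', ?_⟩, hroots⟩
  intro z hz0 hz1
  rw [hlen'] at hz1
  rw [hroots z hz0 hz1]
  obtain ⟨e, _, hval, hfx⟩ :=
    pvHalve_chain p x hc hx0 hx1 hne p.size z hz0 hz1 (hfixall z hz0 hz1)
  exact hfx

-- chain transfer for the union write parent[rb] := ra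
theorem pvUnite_chain (p : Array Int) (ra rb : Int) (hc : pvClosed p)
    (ha0 : 0 ≤ ra) (ha1 : ra < p.size) (hb0 : 0 ≤ rb) (hb1 : rb < p.size)
    (hfa : pvFix p ra) (hfb : pvFix p rb) (hne : ra ≠ rb) :
    ∀ d : Nat, ∀ z : Int, 0 ≤ z → z < p.size → pvFix p (pvIter p d z) →
      ∃ e ≤ d + 1, pvIter (pvASet p rb ra) e z =
          (if pvIter p d z = rb then ra else pvIter p d z) ∧
        pvFix (pvASet p rb ra) (if pvIter p d z = rb then ra else pvIter p d z) := by
  have hg' : ∀ w : Int, 0 ≤ w → w < p.size →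
      pvAG (pvASet p rb ra) w = if w = rb then ra else pvAG p w := by
    intro w hw0 hw1
    exact pvAG_set p rb ra w hb0 hb1 hw0 hw1
  have hfa' : pvFix (pvASet p rb ra) ra := by
    show pvAG _ ra = ra
    rw [hg' ra ha0 ha1, if_neg hne]
    exact hfa
  have hfixcase : ∀ (v : Int), 0 ≤ v → v < p.size → pvFix p v →
      ∃ e ≤ 1, pvIter (pvASet p rb ra) e v = (if v = rb then ra else v) ∧
        pvFix (pvASet p rb ra) (if v = rb then ra else v) := by
    intro v hv0 hv1 hfv
    by_cases hvb : v = rb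
    · subst hvb
      rw [if_pos rfl]
      refine ⟨1, le_refl 1, ?_, hfa'⟩
      show pvAG _ v = ra
      rw [hg' v hv0 hv1, if_pos rfl]
    · rw [if_neg hvb]
      refine ⟨0, Nat.zero_le 1, rfl, ?_⟩
      show pvAG _ v = v
      rw [hg' v hv0 hv1, if_neg hvb]
      exact hfv
  intro d
  induction d with
  | zero =>
    intro z hz0 hz1 hfix
    exact hfixcase z hz0 hz1 hfix
  | succ d ih =>
    intro z hz0 hz1 hfix
    by_cases hz : pvAG p z = z
    · rw [pvIter_fix p (d+1) z hz]
      obtain ⟨e, he, hval, hfx⟩ := hfixcase z hz0 hz1 hz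
      exact ⟨e, by omega, hval, hfx⟩
    · have hzb : z ≠ rb := fun h => hz (by rw [h]; exact hfb)
      have hgz := hc z hz0 hz1
      have hred : pvIter p (d+1) z = pvIter p d (pvAG p z) := rfl
      rw [hred] at hfix ⊢
      obtain ⟨e, he, hval, hfx⟩ := ih (pvAG p z) hgz.1 hgz.2 hfix
      refine ⟨e+1, by omega, ?_, hfx⟩
      show pvIter _ e (pvAG _ z) = _
      rw [hg' z hz0 hz1, if_neg hzb]
      exact hval

theorem pvUnite_good (p : Array Int) (ra rb : Int) (hg : pvGood p)
    (ha0 : 0 ≤ ra) (ha1 : ra < p.size) (hb0 : 0 ≤ rb) (hb1 : rb < p.size)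
    (hfa : pvFix p ra) (hfb : pvFix p rb) (hne : ra ≠ rb) :
    pvGood (pvASet p rb ra) ∧
      (∀ z : Int, 0 ≤ z → z < p.size →
        pvRoot (pvASet p rb ra) z = if pvRoot p z = rb then ra else pvRoot p z) := by
  obtain ⟨hc, hfixall⟩ := hg
  have hlen' : (pvASet p rb ra).size = p.size := pvASet_size p rb ra
  have hc' : pvClosed (pvASet p rb ra) := by
    intro w hw0 hw1
    rw [hlen'] at hw1 ⊢
    rw [pvAG_set p rb ra w hb0 hb1 hw0 hw1]
    by_cases h : w = rb
    · rw [if_pos h]; exact ⟨ha0, ha1⟩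
    · rw [if_neg h]; exact hc w hw0 hw1
  have hroots : ∀ z : Int, 0 ≤ z → z < p.size →
      pvRoot (pvASet p rb ra) z = if pvRoot p z = rb then ra else pvRoot p z := by
    intro z hz0 hz1
    obtain ⟨e, _, hval, hfx⟩ :=
      pvUnite_chain p ra rb hc ha0 ha1 hb0 hb1 hfa hfb hne p.size z hz0 hz1 (hfixall z hz0 hz1)
    exact pvRoot_unique _ z _ e hc' hz0 (by rw [hlen']; exact hz1) hval hfx
  refine ⟨⟨hc', ?_⟩, hroots⟩
  intro z hz0 hz1
  rw [hlen'] at hz1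
  rw [hroots z hz0 hz1]
  obtain ⟨e, _, hval, hfx⟩ :=
    pvUnite_chain p ra rb hc ha0 ha1 hb0 hb1 hfa hfb hne p.size z hz0 hz1 (hfixall z hz0 hz1)
  exact hfx

theorem pvFindA_step (fuel : Nat) (p : Array Int) (x : Int) (h : ¬ pvAG p x = x) :
    pvFindA (fuel+1) p x =
      pvFindA fuel (pvASet p x (pvAG p (pvAG p x)))
        (pvAG (pvASet p x (pvAG p (pvAG p x))) x) := by
  simp only [pvFindA, ne_eq, h, not_false_eq_true, if_true]

-- the find loop returns the root and preserves the forest and all roots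
theorem pvFind_ok (d : Nat) (p : Array Int) (x : Int) (fuel : Nat) (hg : pvGood p)
    (h0 : 0 ≤ x) (h1 : x < p.size) (hd : pvFix p (pvIter p d x)) (hf : d < fuel) :
    (pvFindA fuel p x).1.size = p.size ∧ pvGood (pvFindA fuel p x).1 ∧
      (∀ z : Int, 0 ≤ z → z < p.size → pvRoot (pvFindA fuel p x).1 z = pvRoot p z) ∧
      (pvFindA fuel p x).2 = pvRoot p x := by
  induction d using Nat.strong_induction_on generalizing p x fuel with
  | _ d ih =>
    match fuel, hf with
    | f+1, hf =>
      by_cases hne : pvAG p x = x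
      · have hstep : pvFindA (f+1) p x = (p, x) := by
          simp only [pvFindA, ne_eq, hne, not_true_eq_false, if_false]
        rw [hstep]
        exact ⟨rfl, hg, fun z _ _ => rfl, (pvRoot_of_fix p x hne).symm⟩
      · have hne' : pvAG p x ≠ x := hne
        have hGx := hg.1 x h0 h1
        have hGgg := hg.1 _ hGx.1 hGx.2
        have hlen' : (pvASet p x (pvAG p (pvAG p x))).size = p.size :=
          pvASet_size p x _
        have hx' : pvAG (pvASet p x (pvAG p (pvAG p x))) x = pvAG p (pvAG p x) := by
          rw [pvAG_set p x _ x h0 h1 h0 h1, if_pos rfl]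
        obtain ⟨hGood', hroots'⟩ := pvHalve_good p x hg h0 h1 hne'
        match d, hd with
        | 0, hd => exact absurd hd hne
        | d'+1, hd =>
          have h1' : pvIter p (d'+1+1) x = pvIter p (d'+1) x := by
            rw [pvIter_succ_right]; exact hd
          have hfix2 : pvFix p (pvIter p (d'+1+1) x) := by rw [h1']; exact hd
          have heqgg : pvIter p (d'+1+1) x = pvIter p d' (pvAG p (pvAG p x)) := rfl
          rw [heqgg] at hfix2
          obtain ⟨e, he, hval, hfx⟩ :=
            pvHalve_chain p x hg.1 h0 h1 hne' d' (pvAG p (pvAG p x)) hGgg.1 hGgg.2 hfix2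
          have hfixnew : pvFix (pvASet p x (pvAG p (pvAG p x)))
              (pvIter (pvASet p x (pvAG p (pvAG p x))) e
                (pvAG (pvASet p x (pvAG p (pvAG p x))) x)) := by
            rw [hx', hval]; exact hfx
          obtain ⟨Hlen, HGood, Hroots, Hval⟩ := ih e (by omega)
            (pvASet p x (pvAG p (pvAG p x)))
            (pvAG (pvASet p x (pvAG p (pvAG p x))) x) f hGood'
            (by rw [hx']; exact hGgg.1) (by rw [hx', hlen']; exact hGgg.2) hfixnew (by omega)
          have hstep : pvFindA (f+1) p x =
              pvFindA f (pvASet p x (pvAG p (pvAG p x)))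
                (pvAG (pvASet p x (pvAG p (pvAG p x))) x) := by
            simp only [pvFindA, ne_eq, hne, not_false_eq_true, if_true]
          rw [hstep]
          refine ⟨by rw [Hlen, hlen'], HGood, ?_, ?_⟩
          · intro z hz0 hz1
            rw [Hroots z hz0 (by rw [hlen']; exact hz1), hroots' z hz0 hz1]
          · rw [Hval, hx', hroots' _ hGgg.1 hGgg.2, pvRoot_g p _ hg hGx.1 hGx.2,
              pvRoot_g p x hg h0 h1]

theorem pvFind_any (p : Array Int) (x : Int) (hg : pvGood p)
    (h0 : -(p.size:Int) ≤ x) (h1 : x < p.size) :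
    (pvFindA (p.size + 1) p x).1.size = p.size ∧ pvGood (pvFindA (p.size + 1) p x).1 ∧
      (∀ z : Int, 0 ≤ z → z < p.size →
        pvRoot (pvFindA (p.size + 1) p x).1 z = pvRoot p z) ∧
      (pvFindA (p.size + 1) p x).2 = pvRoot p (pvNorm p.size x) := by
  by_cases hx : 0 ≤ x
  · have hnorm : pvNorm p.size x = x := by unfold pvNorm; rw [if_neg (by omega)]
    rw [hnorm]
    exact pvFind_ok p.size p x (p.size + 1) hg hx h1
      (hg.2 x hx h1) (Nat.lt_succ_self _)
  · -- negative index: Python wraps; the first loop step coincides with the one from x + len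
    have hxneg : x < 0 := by omega
    have hlenpos : 0 < p.size := by omega
    have hx0 : (0:Int) ≤ x + p.size := by omega
    have hx1 : x + (p.size:Int) < p.size := by omega
    have hnorm : pvNorm p.size x = x + p.size := by unfold pvNorm; rw [if_pos hxneg]
    have hGnorm : pvAG p x = pvAG p (x + p.size) := pvAG_neg p x h0 hxneg
    have hGb := hg.1 _ hx0 hx1
    have hne' : pvAG p x ≠ x := by rw [hGnorm]; omega
    rw [hnorm]
    by_cases hfix : pvAG p (x + (p.size:Int)) = x + p.size
    · have hv : pvAG p x = x + p.size := by rw [hGnorm, hfix]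
      have hset : pvASet p x (pvAG p (pvAG p x)) = p := by
        rw [hv, pvASet_neg p x _ h0 hxneg]
        exact pvASet_self p _ hx0 hx1
      have hstep : pvFindA (p.size + 1) p x = pvFindA p.size p (x + p.size) := by
        rw [pvFindA_step p.size p x hne', hset, hv]
      rw [hstep]
      exact pvFind_ok 0 p (x + p.size) p.size hg hx0 hx1 hfix hlenpos
    · have hne'' : pvAG p (x + (p.size:Int)) ≠ x + p.size := hfix
      have hPP : pvASet p x (pvAG p (pvAG p x)) =
          pvASet p (x + p.size) (pvAG p (pvAG p (x + p.size))) := by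
        rw [hGnorm, pvASet_neg p x _ h0 hxneg]
      have hlenS : (pvASet p (x + (p.size:Int)) (pvAG p (pvAG p (x + p.size)))).size
          = p.size := pvASet_size ..
      have hGS : pvAG (pvASet p (x + (p.size:Int)) (pvAG p (pvAG p (x + p.size)))) x
          = pvAG (pvASet p (x + (p.size:Int)) (pvAG p (pvAG p (x + p.size))))
              (x + p.size) := by
        have h := pvAG_neg (pvASet p (x + (p.size:Int)) (pvAG p (pvAG p (x + p.size))))
          x (by rw [hlenS]; exact h0) hxneg
        rw [hlenS] at h
        exact h
      have hsame : pvFindA (p.size + 1) p x = pvFindA (p.size + 1) p (x + p.size) := by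
        rw [pvFindA_step p.size p x hne', pvFindA_step p.size p (x + p.size) hne'',
          hPP, hGS]
      rw [hsame]
      exact pvFind_ok p.size p (x + p.size) (p.size + 1) hg hx0 hx1
        (hg.2 _ hx0 hx1) (Nat.lt_succ_self _)

theorem pvUnion_ok (p : Array Int) (a b : Int) (hg : pvGood p)
    (ha0 : -(p.size:Int) ≤ a) (ha1 : a < p.size) (hb0 : -(p.size:Int) ≤ b) (hb1 : b < p.size) :
    (pvUnionA p a b).size = p.size ∧ pvGood (pvUnionA p a b) ∧
      (∀ z : Int, 0 ≤ z → z < p.size →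
        pvRoot (pvUnionA p a b) z =
          if pvRoot p (pvNorm p.size a) = pvRoot p (pvNorm p.size b) then pvRoot p z
          else if pvRoot p z = pvRoot p (pvNorm p.size b) then pvRoot p (pvNorm p.size a)
          else pvRoot p z) := by
  have hna : 0 ≤ pvNorm p.size a ∧ pvNorm p.size a < p.size := by
    unfold pvNorm; split <;> omega
  have hnb : 0 ≤ pvNorm p.size b ∧ pvNorm p.size b < p.size := by
    unfold pvNorm; split <;> omega
  obtain ⟨hL1, hG1, hR1, hV1⟩ := pvFind_any p a hg ha0 ha1
  -- second find runs on the array the first find left behind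
  have hb0' : -(((pvFindA (p.size + 1) p a).1.size:Nat):Int) ≤ b := by rw [hL1]; exact hb0
  have hb1' : b < ((pvFindA (p.size + 1) p a).1.size:Nat) := by rw [hL1]; exact hb1
  obtain ⟨hL2, hG2, hR2, hV2⟩ := pvFind_any (pvFindA (p.size + 1) p a).1 b hG1 hb0' hb1'
  have hfuel : (pvFindA (p.size + 1) p a).1.size + 1 = p.size + 1 := by rw [hL1]
  have hnormb : pvNorm (pvFindA (p.size + 1) p a).1.size b = pvNorm p.size b := by
    rw [hL1]
  have hV2' : (pvFindA ((pvFindA (p.size + 1) p a).1.size + 1)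
      (pvFindA (p.size + 1) p a).1 b).2 = pvRoot p (pvNorm p.size b) := by
    rw [hV2, hnormb, hR1 _ hnb.1 hnb.2]
  have hR12 : ∀ z : Int, 0 ≤ z → z < p.size →
      pvRoot (pvFindA ((pvFindA (p.size + 1) p a).1.size + 1)
        (pvFindA (p.size + 1) p a).1 b).1 z = pvRoot p z := by
    intro z hz0 hz1
    rw [hR2 z hz0 (by rw [hL1]; exact hz1), hR1 z hz0 hz1]
  have hL12 : (pvFindA ((pvFindA (p.size + 1) p a).1.size + 1)
      (pvFindA (p.size + 1) p a).1 b).1.size = p.size := by rw [hL2, hL1]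
  unfold pvUnionA
  by_cases hrr : pvRoot p (pvNorm p.size a) = pvRoot p (pvNorm p.size b)
  · have hcond : ¬ ((pvFindA (p.size + 1) p a).2 ≠
        (pvFindA ((pvFindA (p.size + 1) p a).1.size + 1) (pvFindA (p.size + 1) p a).1 b).2) := by
      rw [hV1, hV2', hrr]
      simp
    rw [if_neg hcond]
    refine ⟨hL12, hG2, ?_⟩
    intro z hz0 hz1
    rw [if_pos hrr]
    exact hR12 z hz0 hz1
  · have hcond : ((pvFindA (p.size + 1) p a).2 ≠
        (pvFindA ((pvFindA (p.size + 1) p a).1.size + 1) (pvFindA (p.size + 1) p a).1 b).2) := by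
      rw [hV1, hV2']
      exact hrr
    rw [if_pos hcond]
    -- the final write parent[rb] := ra on the array p₂ the two finds produced
    have hra := pvRoot_mem p (pvNorm p.size a) hg.1 hna.1 hna.2
    have hrb := pvRoot_mem p (pvNorm p.size b) hg.1 hnb.1 hnb.2
    have hfixa : pvFix (pvFindA ((pvFindA (p.size + 1) p a).1.size + 1)
        (pvFindA (p.size + 1) p a).1 b).1 (pvRoot p (pvNorm p.size a)) := by
      have h := hG2.2 (pvRoot p (pvNorm p.size a)) hra.1 (by rw [hL12]; exact hra.2)
      rw [hR12 _ hra.1 hra.2] at h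
      rw [pvRoot_of_fix p _ (hg.2 _ hna.1 hna.2)] at h
      exact h
    have hfixb : pvFix (pvFindA ((pvFindA (p.size + 1) p a).1.size + 1)
        (pvFindA (p.size + 1) p a).1 b).1 (pvRoot p (pvNorm p.size b)) := by
      have h := hG2.2 (pvRoot p (pvNorm p.size b)) hrb.1 (by rw [hL12]; exact hrb.2)
      rw [hR12 _ hrb.1 hrb.2] at h
      rw [pvRoot_of_fix p _ (hg.2 _ hnb.1 hnb.2)] at h
      exact h
    have hU := pvUnite_good (pvFindA ((pvFindA (p.size + 1) p a).1.size + 1)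
        (pvFindA (p.size + 1) p a).1 b).1
      (pvRoot p (pvNorm p.size a)) (pvRoot p (pvNorm p.size b)) hG2
      hra.1 (by rw [hL12]; exact hra.2) hrb.1 (by rw [hL12]; exact hrb.2) hfixa hfixb hrr
    rw [hV1, hV2']
    refine ⟨by rw [pvASet_size, hL12], hU.1, ?_⟩
    intro z hz0 hz1
    rw [if_neg hrr]
    have h := hU.2 z hz0 (by rw [hL12]; exact hz1)
    rw [hR12 z hz0 hz1] at h
    rw [h]

theorem pvG_norm (L : List Int) (x : Int) (h0 : -(L.length:Int) ≤ x) (_h1 : x < L.length) :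
    pvG L x = pvG L (pvNorm L.length x) := by
  unfold pvNorm
  split
  · exact pvG_neg L x h0 (by assumption)
  · rfl

theorem pvContains_ofList (l : List Int) (y : Int) :
    (PySem.Set.contains (PySem.Set.ofList l) y = true) ↔ y ∈ l := by
  rw [PySem.Set.contains, List.contains_iff_mem, PySem.Set.mem_ofList]

theorem pvFoldl_noop {α β : Type} (l : List α) (f : β → α → β) (s : β)
    (h : ∀ (b : β) (a : α), a ∈ l → f b a = b) : l.foldl f s = s := by
  induction l generalizing s with
  | nil => rfl
  | cons a l ih =>
    rw [List.foldl_cons, h s a List.mem_cons_self]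
    exact ih s (fun b a' ha' => h b a' (List.mem_cons_of_mem a ha'))

-- the pure logic of collapsing one class into another on both sides
theorem pvCollapse (fi fj ra rb gi gj lu lv : Int)
    (h : fi = fj ↔ gi = gj) (hia : fi = ra ↔ gi = lu) (hib : fi = rb ↔ gi = lv)
    (hja : fj = ra ↔ gj = lu) (hjb : fj = rb ↔ gj = lv) :
    ((if fi = rb then ra else fi) = (if fj = rb then ra else fj)) ↔
    ((if gi = lv then lu else gi) = (if gj = lv then lu else gj)) := by
  split_ifs with c1 c2 c2' <;> simp_all [eq_comm]

-- the main loops of A and B keep (pvGood, pvKern) in lockstep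
theorem pvFold (threshold : Int) (edges : List (Int × Int × Int)) (p : Array Int) (L : List Int)
    (hlen : p.size = L.length) (hg : pvGood p) (hk : pvKern p L)
    (hpre : ∀ e ∈ edges, e.2.2 < threshold →
      -(p.size:Int) ≤ e.1 ∧ e.1 < p.size ∧ -(p.size:Int) ≤ e.2.1 ∧ e.2.1 < p.size) :
    (edges.foldl (fun p e => if e.2.2 < threshold then pvUnionA p e.1 e.2.1 else p) p).size = p.size ∧
    (edges.foldl (fun L e =>
      if e.2.2 < threshold then
        let lu := pvG L e.1
        let lv := pvG L e.2.1
        if lu ≠ lv then L.map (fun l => if l = lv then lu else l) else L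
      else L) L).length = L.length ∧
    pvGood (edges.foldl (fun p e => if e.2.2 < threshold then pvUnionA p e.1 e.2.1 else p) p) ∧
    pvKern (edges.foldl (fun p e => if e.2.2 < threshold then pvUnionA p e.1 e.2.1 else p) p)
      (edges.foldl (fun L e =>
        if e.2.2 < threshold then
          let lu := pvG L e.1
          let lv := pvG L e.2.1
          if lu ≠ lv then L.map (fun l => if l = lv then lu else l) else L
        else L) L) := by
  induction edges generalizing p L with
  | nil => exact ⟨rfl, rfl, hg, hk⟩
  | cons e es ih =>
    simp only [List.foldl_cons]
    by_cases hw : e.2.2 < threshold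
    · obtain ⟨hu0, hu1, hv0, hv1⟩ := hpre e List.mem_cons_self hw
      rw [if_pos hw, if_pos hw]
      have hna : 0 ≤ pvNorm p.size e.1 ∧ pvNorm p.size e.1 < p.size := by
        unfold pvNorm; split <;> omega
      have hnb : 0 ≤ pvNorm p.size e.2.1 ∧ pvNorm p.size e.2.1 < p.size := by
        unfold pvNorm; split <;> omega
      have hU := pvUnion_ok p e.1 e.2.1 hg hu0 hu1 hv0 hv1
      have hlu : pvG L e.1 = pvG L (pvNorm p.size e.1) := by
        have h := pvG_norm L e.1 (by rw [hlen] at hu0; exact hu0) (by rw [hlen] at hu1; exact hu1)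
        rw [← hlen] at h
        exact h
      have hlv : pvG L e.2.1 = pvG L (pvNorm p.size e.2.1) := by
        have h := pvG_norm L e.2.1 (by rw [hlen] at hv0; exact hv0) (by rw [hlen] at hv1; exact hv1)
        rw [← hlen] at h
        exact h
      have hkuv := hk (pvNorm p.size e.1) (pvNorm p.size e.2.1) hna.1 hna.2 hnb.1 hnb.2
      have hpre' : ∀ e' ∈ es, e'.2.2 < threshold →
          -((pvUnionA p e.1 e.2.1).size:Int) ≤ e'.1 ∧ e'.1 < (pvUnionA p e.1 e.2.1).size ∧
          -((pvUnionA p e.1 e.2.1).size:Int) ≤ e'.2.1 ∧ e'.2.1 < (pvUnionA p e.1 e.2.1).size := by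
        intro e' he' hw'
        rw [hU.1]
        exact hpre e' (List.mem_cons_of_mem e he') hw'
      by_cases heq : pvRoot p (pvNorm p.size e.1) = pvRoot p (pvNorm p.size e.2.1)
      · have hluv : pvG L e.1 = pvG L e.2.1 := by rw [hlu, hlv]; exact hkuv.mp heq
        rw [if_neg (fun h => h hluv)]
        have hkern : pvKern (pvUnionA p e.1 e.2.1) L := by
          intro i j hi0 hi1 hj0 hj1
          rw [hU.1] at hi1 hj1
          rw [hU.2.2 i hi0 hi1, hU.2.2 j hj0 hj1, if_pos heq, if_pos heq]
          exact hk i j hi0 hi1 hj0 hj1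
        have hres := ih (pvUnionA p e.1 e.2.1) L (hU.1.trans hlen) hU.2.1 hkern hpre'
        exact ⟨hres.1.trans hU.1, hres.2.1, hres.2.2⟩
      · have hluv : pvG L e.1 ≠ pvG L e.2.1 := by
          rw [hlu, hlv]; exact fun h => heq (hkuv.mpr h)
        rw [if_pos hluv]
        have hkern : pvKern (pvUnionA p e.1 e.2.1)
            (L.map (fun l => if l = pvG L e.2.1 then pvG L e.1 else l)) := by
          intro i j hi0 hi1 hj0 hj1
          rw [hU.1] at hi1 hj1
          have hiL : i < L.length := by rw [← hlen]; exact hi1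
          have hjL : j < L.length := by rw [← hlen]; exact hj1
          rw [hU.2.2 i hi0 hi1, hU.2.2 j hj0 hj1, if_neg heq, if_neg heq,
            pvG_map _ L i hi0 hiL, pvG_map _ L j hj0 hjL]
          exact pvCollapse (pvRoot p i) (pvRoot p j)
            (pvRoot p (pvNorm p.size e.1)) (pvRoot p (pvNorm p.size e.2.1))
            (pvG L i) (pvG L j) (pvG L e.1) (pvG L e.2.1)
            (hk i j hi0 hi1 hj0 hj1)
            (by rw [hlu]; exact hk i _ hi0 hi1 hna.1 hna.2)
            (by rw [hlv]; exact hk i _ hi0 hi1 hnb.1 hnb.2)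
            (by rw [hlu]; exact hk j _ hj0 hj1 hna.1 hna.2)
            (by rw [hlv]; exact hk j _ hj0 hj1 hnb.1 hnb.2)
        have hres := ih (pvUnionA p e.1 e.2.1)
          (L.map (fun l => if l = pvG L e.2.1 then pvG L e.1 else l))
          (by rw [hU.1, hlen, List.length_map]) hU.2.1 hkern hpre'
        refine ⟨hres.1.trans hU.1, hres.2.1.trans (by rw [List.length_map]), hres.2.2⟩
    · rw [if_neg hw, if_neg hw]
      exact ih p L hlen hg hk (fun e' he' hw' => hpre e' (List.mem_cons_of_mem e he') hw')

-- the counting loop of A inserts exactly the roots of the processed indices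
theorem pvCount (xs : List Int) (p : Array Int) (s : Std.HashSet Int) (hg : pvGood p)
    (hmem : ∀ x ∈ xs, 0 ≤ x ∧ x < p.size) :
    (xs.foldl (fun (st : Array Int × Std.HashSet Int) i =>
      let f := pvFindA (st.1.size + 1) st.1 i
      (f.1, st.2.insert f.2)) (p, s)).2 =
    (xs.map (pvRoot p)).foldl (fun h r => h.insert r) s := by
  induction xs generalizing p s with
  | nil => rfl
  | cons x xs ih =>
    obtain ⟨hx0, hx1⟩ := hmem x List.mem_cons_self
    obtain ⟨hL, hG, hR, hV⟩ := pvFind_ok p.size p x (p.size + 1) hg hx0 hx1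
      (hg.2 x hx0 hx1) (Nat.lt_succ_self _)
    simp only [List.foldl_cons, hV]
    have hmem' : ∀ y ∈ xs, 0 ≤ y ∧ y < (pvFindA (p.size + 1) p x).1.size := by
      intro y hy
      obtain ⟨a, b⟩ := hmem y (List.mem_cons_of_mem x hy)
      exact ⟨a, by rw [hL]; exact b⟩
    rw [ih (pvFindA (p.size + 1) p x).1 (s.insert (pvRoot p x)) hG hmem']
    have hcongr : xs.map (pvRoot (pvFindA (p.size + 1) p x).1) = xs.map (pvRoot p) := by
      apply List.map_congr_left
      intro y hy
      obtain ⟨a, b⟩ := hmem y (List.mem_cons_of_mem x hy)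
      exact hR y a b
    rw [hcongr, List.map_cons, List.foldl_cons]

-- folding HashSet.insert counts exactly as many elements as the Python set does
theorem pvHashBridge (l : List Int) : ∀ (h : Std.HashSet Int) (s : PySem.Set Int),
    (∀ a : Int, a ∈ h ↔ a ∈ s) → h.size = s.length →
    (l.foldl (fun h r => h.insert r) h).size = (PySem.Set.update s l).length := by
  induction l with
  | nil => intro h s _ hsize; exact hsize
  | cons a l ih =>
    intro h s hmem hsize
    rw [List.foldl_cons, PySem.Set.update_cons]
    apply ih (h.insert a) (PySem.Set.add s a)
    · intro b
      rw [Std.HashSet.mem_insert, PySem.Set.mem_add, beq_iff_eq, hmem b]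
      tauto
    · rw [Std.HashSet.size_insert, PySem.Set.add]
      by_cases hin : a ∈ h
      · rw [if_pos hin, if_pos (by
          rw [PySem.Set.contains, List.contains_iff_mem]
          exact (hmem a).mp hin)]
        exact hsize
      · rw [if_neg hin, if_neg (by
          rw [PySem.Set.contains, List.contains_iff_mem]
          exact fun hm => hin ((hmem a).mpr hm))]
        rw [List.length_append, hsize]
        rfl

-- two kernel-equal labelings have the same number of distinct values
theorem pvCardEq (xs : List Int) (f g : Int → Int)
    (h : ∀ a ∈ xs, ∀ b ∈ xs, (f a = f b ↔ g a = g b)) :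
    (PySem.Set.ofList (xs.map f)).length = (PySem.Set.ofList (xs.map g)).length := by
  induction xs using List.reverseRecOn with
  | nil => rfl
  | append_singleton xs a ih =>
    have hsub : ∀ b ∈ xs, ∀ c ∈ xs, (f b = f c ↔ g b = g c) := by
      intro b hb c hc
      exact h b (List.mem_append_left _ hb) c (List.mem_append_left _ hc)
    have hiff : f a ∈ xs.map f ↔ g a ∈ xs.map g := by
      simp only [List.mem_map]
      constructor
      · rintro ⟨b, hb, hfb⟩
        exact ⟨b, hb, (h b (List.mem_append_left _ hb) a (List.mem_append_right _
          List.mem_cons_self)).mp hfb⟩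
      · rintro ⟨b, hb, hgb⟩
        exact ⟨b, hb, (h b (List.mem_append_left _ hb) a (List.mem_append_right _
          List.mem_cons_self)).mpr hgb⟩
    rw [List.map_append, List.map_append, List.map_singleton, List.map_singleton,
      PySem.Set.ofList_append_singleton, PySem.Set.ofList_append_singleton,
      PySem.Set.add, PySem.Set.add]
    by_cases hm : f a ∈ xs.map f
    · rw [if_pos ((pvContains_ofList _ _).mpr hm),
        if_pos ((pvContains_ofList _ _).mpr (hiff.mp hm))]
      exact ih hsub
    · rw [if_neg (by rw [pvContains_ofList]; exact hm),
        if_neg (by rw [pvContains_ofList]; exact fun hmg => hm (hiff.mpr hmg))]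
      rw [List.length_append, List.length_append, ih hsub]
      rfl

-- B's labels always label each cluster by one of its own members
def pvLab (L : List Int) : Prop := ∀ v ∈ L, 0 ≤ v ∧ v < L.length ∧ pvG L v = v

theorem pvLab_fold (threshold : Int) (edges : List (Int × Int × Int)) :
    ∀ L : List Int, pvLab L →
    (∀ e ∈ edges, e.2.2 < threshold →
      -(L.length:Int) ≤ e.1 ∧ e.1 < L.length ∧ -(L.length:Int) ≤ e.2.1 ∧ e.2.1 < L.length) →
    (edges.foldl (fun L e =>
      if e.2.2 < threshold then
        let lu := pvG L e.1
        let lv := pvG L e.2.1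
        if lu ≠ lv then L.map (fun l => if l = lv then lu else l) else L
      else L) L).length = L.length ∧
    pvLab (edges.foldl (fun L e =>
      if e.2.2 < threshold then
        let lu := pvG L e.1
        let lv := pvG L e.2.1
        if lu ≠ lv then L.map (fun l => if l = lv then lu else l) else L
      else L) L) := by
  induction edges with
  | nil => exact fun L hlab _ => ⟨rfl, hlab⟩
  | cons e es ih =>
    intro L hlab hpre
    simp only [List.foldl_cons]
    by_cases hw : e.2.2 < threshold
    · obtain ⟨hu0, hu1, hv0, hv1⟩ := hpre e List.mem_cons_self hw
      rw [if_pos hw]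
      by_cases hne : pvG L e.1 ≠ pvG L e.2.1
      · rw [if_pos hne]
        have hnu : 0 ≤ pvNorm L.length e.1 ∧ pvNorm L.length e.1 < L.length := by
          unfold pvNorm; split <;> omega
        have hluL : pvG L e.1 ∈ L := by
          rw [pvG_norm L e.1 hu0 hu1]
          exact pvG_mem L _ hnu.1 hnu.2
        obtain ⟨hlu0, hlu1, hlufix⟩ := hlab _ hluL
        have hlab' : pvLab (L.map (fun l => if l = pvG L e.2.1 then pvG L e.1 else l)) := by
          intro v' hv'
          rw [List.mem_map] at hv'
          obtain ⟨v, hvL, rfl⟩ := hv'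
          by_cases hvlv : v = pvG L e.2.1
          · rw [if_pos hvlv]
            refine ⟨hlu0, by simpa using hlu1, ?_⟩
            rw [pvG_map _ L _ hlu0 hlu1, hlufix, if_neg hne]
          · rw [if_neg hvlv]
            obtain ⟨h0, h1, hfix⟩ := hlab v hvL
            refine ⟨h0, by simpa using h1, ?_⟩
            rw [pvG_map _ L _ h0 h1, hfix, if_neg hvlv]
        have hres := ih (L.map (fun l => if l = pvG L e.2.1 then pvG L e.1 else l)) hlab'
          (by
            intro e' he' hw'
            have := hpre e' (List.mem_cons_of_mem e he') hw'
            simpa using this)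
        refine ⟨hres.1.trans (by simp), hres.2⟩
      · rw [if_neg hne]
        exact ih L hlab (fun e' he' hw' => hpre e' (List.mem_cons_of_mem e he') hw')
    · rw [if_neg hw]
      exact ih L hlab (fun e' he' hw' => hpre e' (List.mem_cons_of_mem e he') hw')

-- the number of distinct labels equals the number of self-labelled indices
theorem pvDistinctFixed (L : List Int) (hlab : pvLab L) :
    (PySem.Set.ofList L).length =
    ((PySem.List.pyRange 0 L.length 1).filter (fun j => decide (pvG L j = j))).length := by
  have h1 : (PySem.Set.ofList L).Nodup := PySem.Set.nodup_ofList L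
  have h2 : ((PySem.List.pyRange 0 L.length 1).filter (fun j => decide (pvG L j = j))).Nodup :=
    (PySem.List.nodup_pyRange_one 0 L.length).filter _
  rw [← List.toFinset_card_of_nodup h1, ← List.toFinset_card_of_nodup h2]
  congr 1
  apply Finset.ext
  intro a
  simp only [List.mem_toFinset, PySem.Set.mem_ofList, List.mem_filter,
    PySem.List.mem_pyRange_one, decide_eq_true_eq]
  constructor
  · intro ha
    obtain ⟨b0, b1, bf⟩ := hlab a ha
    exact ⟨⟨b0, b1⟩, bf⟩
  · rintro ⟨⟨b0, b1⟩, bf⟩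
    rw [← bf]
    exact pvG_mem L a b0 b1

-- evaluating B's counting fold: it counts the self-labelled positions
theorem pvEnumCount (l : List Int) : ∀ i c : Int,
    (l.foldl (fun (st : Int × Int) x => (st.1 + 1, if x = st.1 then st.2 + 1 else st.2)) (i, c)).2
      = c + (((List.range l.length).filter
          (fun (k : Nat) => decide (l[k]? = some (i + (k:Int))))).length : Int) := by
  induction l with
  | nil => intro i c; simp
  | cons x l ih =>
    intro i c
    rw [List.foldl_cons]
    show (l.foldl _ (i + 1, if x = i then c + 1 else c)).2 = _
    rw [ih]
    rw [List.length_cons, List.range_succ_eq_map, List.filter_cons, List.filter_map]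
    have hpred : ((fun (k : Nat) => decide ((x :: l)[k]? = some (i + (k:Int)))) ∘ Nat.succ)
        = fun (k : Nat) => decide (l[k]? = some ((i + 1) + (k:Int))) := by
      funext k
      simp only [Function.comp, List.getElem?_cons_succ]
      congr 2
      push_cast
      ring
    rw [hpred]
    by_cases hx : x = i
    · rw [if_pos hx]
      rw [if_pos (show decide ((x :: l)[0]? = some (i + ((0:Nat):Int))) = true by simp [hx])]
      rw [List.length_cons, List.length_map]
      push_cast
      omega
    · rw [if_neg hx]
      rw [if_neg (show ¬ decide ((x :: l)[0]? = some (i + ((0:Nat):Int))) = true by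
        simp [hx])]
      rw [List.length_map]

theorem pvFixCount (L : List Int) :
    (L.foldl (fun (st : Int × Int) l => (st.1 + 1, if l = st.1 then st.2 + 1 else st.2)) (0, 0)).2
      = (((PySem.List.pyRange 0 L.length 1).filter (fun j => decide (pvG L j = j))).length : Int) := by
  rw [pvEnumCount, zero_add]
  congr 1
  rw [PySem.List.pyRange_one, List.filter_map, List.length_map]
  have hb : ((L.length:Int) - 0).toNat = L.length := by omega
  rw [hb]
  congr 1
  apply List.filter_congr
  intro k hk
  rw [List.mem_range] at hk
  simp only [Function.comp, zero_add]
  have hget : pvG L (k:Int) = (L[k]?).getD 0 := by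
    rw [pvG, PySem.List.pyGetD, PySem.List.pyGet?_natCast]
  rw [List.getElem?_eq_getElem hk]
  simp only [hget, List.getElem?_eq_getElem hk, Option.getD_some, Option.some.injEq]

-- ===== VERDICT (by name: the statement is the Claim_ definition above) =====
theorem count_clusters_at_threshold_py_spec : Claim_equal_count_clusters_at_threshold_py := by
  unfold Claim_equal_count_clusters_at_threshold_py
  intro edges ns t hdom hpre
  unfold Spec_count_clusters_at_threshold_py
  unfold count_clusters_at_threshold_py count_clusters_at_threshold_py_alt
  simp only []
  by_cases hns : 0 ≤ ns
  · have hlen0 : (PySem.List.pyRange 0 ns 1).length = ns.toNat := by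
      rw [PySem.List.length_pyRange_one]; simp
    have hcast : (((PySem.List.pyRange 0 ns 1).length):Int) = ns := by rw [hlen0]; omega
    have hsize0 : (PySem.List.pyRange 0 ns 1).toArray.size = (PySem.List.pyRange 0 ns 1).length := by
      simp
    have hget0 : ∀ i : Int, 0 ≤ i → i < (((PySem.List.pyRange 0 ns 1).length):Int) →
        pvG (PySem.List.pyRange 0 ns 1) i = i := by
      intro i h0 h1
      rw [pvG, PySem.List.pyGetD_eq_getElem _ 0 h0 h1, PySem.List.getElem_pyRange_one]
      omega
    have hget0A : ∀ i : Int, 0 ≤ i → i < (((PySem.List.pyRange 0 ns 1).toArray.size):Int) →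
        pvAG (PySem.List.pyRange 0 ns 1).toArray i = i := by
      intro i h0 h1
      rw [hsize0] at h1
      rw [pvAG_get _ i h0 (by rw [hsize0]; omega), List.getElem_toArray,
        PySem.List.getElem_pyRange_one]
      omega
    have hg0 : pvGood (PySem.List.pyRange 0 ns 1).toArray := by
      constructor
      · intro x h0 h1
        rw [hget0A x h0 h1]
        exact ⟨h0, h1⟩
      · intro x h0 h1
        rw [pvRoot_of_fix _ x (hget0A x h0 h1)]
        exact hget0A x h0 h1
    have hk0 : pvKern (PySem.List.pyRange 0 ns 1).toArray (PySem.List.pyRange 0 ns 1) := by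
      intro i j hi0 hi1 hj0 hj1
      rw [pvRoot_of_fix _ i (hget0A i hi0 hi1), pvRoot_of_fix _ j (hget0A j hj0 hj1),
        hget0 i hi0 (by rw [hsize0] at hi1; exact hi1),
        hget0 j hj0 (by rw [hsize0] at hj1; exact hj1)]
    have hpre0 : ∀ e ∈ edges, e.2.2 < t →
        -(((PySem.List.pyRange 0 ns 1).toArray.size):Int) ≤ e.1 ∧
        e.1 < ((PySem.List.pyRange 0 ns 1).toArray.size) ∧
        -(((PySem.List.pyRange 0 ns 1).toArray.size):Int) ≤ e.2.1 ∧
        e.2.1 < ((PySem.List.pyRange 0 ns 1).toArray.size) := by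
      intro e he hw
      rw [hsize0, hcast]
      exact hpre e he hw
    have hpre0L : ∀ e ∈ edges, e.2.2 < t →
        -(((PySem.List.pyRange 0 ns 1).length):Int) ≤ e.1 ∧
        e.1 < ((PySem.List.pyRange 0 ns 1).length) ∧
        -(((PySem.List.pyRange 0 ns 1).length):Int) ≤ e.2.1 ∧
        e.2.1 < ((PySem.List.pyRange 0 ns 1).length) := by
      intro e he hw
      rw [hcast]
      exact hpre e he hw
    have hlab0 : pvLab (PySem.List.pyRange 0 ns 1) := by
      intro v hv
      rw [PySem.List.mem_pyRange_one] at hv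
      refine ⟨hv.1, by rw [hcast]; exact hv.2, ?_⟩
      exact hget0 v hv.1 (by rw [hcast]; exact hv.2)
    obtain ⟨hPlen, hLlen, hPGood, hPK⟩ :=
      pvFold t edges (PySem.List.pyRange 0 ns 1).toArray (PySem.List.pyRange 0 ns 1)
        hsize0 hg0 hk0 hpre0
    obtain ⟨hLlen2, hLab⟩ := pvLab_fold t edges (PySem.List.pyRange 0 ns 1) hlab0 hpre0L
    set P := edges.foldl (fun p e => if e.2.2 < t then pvUnionA p e.1 e.2.1 else p)
      (PySem.List.pyRange 0 ns 1).toArray with hPdef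
    set L := edges.foldl (fun L e =>
      if e.2.2 < t then
        let lu := pvG L e.1
        let lv := pvG L e.2.1
        if lu ≠ lv then L.map (fun l => if l = lv then lu else l) else L
      else L) (PySem.List.pyRange 0 ns 1) with hLdef
    have hPsize : (P.size:Int) = ns := by rw [hPlen, hsize0, hcast]
    have hLlen' : (L.length:Int) = ns := by rw [hLlen, hcast]
    have hmemrange : ∀ x ∈ PySem.List.pyRange 0 ns 1, 0 ≤ x ∧ x < P.size := by
      intro x hx
      rw [PySem.List.mem_pyRange_one] at hx
      exact ⟨hx.1, by rw [hPsize]; exact hx.2⟩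
    rw [pvCount (PySem.List.pyRange 0 ns 1) P (∅ : Std.HashSet Int) hPGood hmemrange]
    rw [pvHashBridge ((PySem.List.pyRange 0 ns 1).map (pvRoot P)) (∅ : Std.HashSet Int) []
      (fun a => by simp [Std.HashSet.not_mem_empty]) (by simp)]
    rw [PySem.Set.update_nil_left]
    -- same number of distinct values on both sides of the kernel
    have hkern : ∀ a ∈ PySem.List.pyRange 0 ns 1, ∀ b ∈ PySem.List.pyRange 0 ns 1,
        (pvRoot P a = pvRoot P b ↔ pvG L a = pvG L b) := by
      intro a ha b hb
      rw [PySem.List.mem_pyRange_one] at ha hb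
      exact hPK a b ha.1 (by rw [hPsize]; exact ha.2) hb.1 (by rw [hPsize]; exact hb.2)
    rw [pvCardEq (PySem.List.pyRange 0 ns 1) (pvRoot P) (fun j => pvG L j) hkern]
    have hLmap : (PySem.List.pyRange 0 ns 1).map (fun j => pvG L j) = L := by
      have h := PySem.List.map_pyGetD_pyRange_zero' L 0
      rw [show ((L.length:Nat):Int) = ns from hLlen'] at h
      exact h
    rw [hLmap, pvDistinctFixed L hLab]
    -- B's fold counts exactly the self-labelled indices
    rw [pvFixCount L]
  · have hrange : PySem.List.pyRange 0 ns 1 = [] := PySem.List.pyRange_one_eq_nil (by omega)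
    have hskipA : ∀ (b : Array Int) (a : Int × Int × Int), a ∈ edges →
        (if a.2.2 < t then pvUnionA b a.1 a.2.1 else b) = b := by
      intro b a ha
      rw [if_neg (by have := hpre a ha; omega)]
    have hskipB : ∀ (b : List Int) (a : Int × Int × Int), a ∈ edges →
        (if a.2.2 < t then
          let lu := pvG b a.1
          let lv := pvG b a.2.1
          if lu ≠ lv then b.map (fun l => if l = lv then lu else l) else b
        else b) = b := by
      intro b a ha
      rw [if_neg (by have := hpre a ha; omega)]
    rw [hrange, pvFoldl_noop edges _ ([] : List Int).toArray hskipA,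
      pvFoldl_noop edges _ ([] : List Int) hskipB]
    rfl
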